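-- pv_equiv track=rewrite | github.com/meredithmurfin/DynamicPlacementGenerator | services/solve.py | current_action_is_possible_with_current_state
-- ===== SOURCE A (Python) =====
-- def current_action_is_possible_with_current_state(current_action, current_state):
-- 	current_state_to_edit = current_state[:]
-- 	# Iterate over every index of the current action
-- 	for engine_from in range(7):
-- 		for engine_to in range(7):
-- 			num_engines_to_move_from_current_hub = current_action[engine_from][engine_to]
-- 			# If the current index indicates engines are moved from one hub to another
-- 			if num_engines_to_move_from_current_hub > 0:
-- 				num_engines_at_current_hub = current_state_to_edit[engine_from]
-- 				# If the number of engines at the hub to move engines from is equal to zero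
-- 				if num_engines_at_current_hub == 0:
-- 					return False # The action is not possible
-- 				# If the number of engines to move from the hub is greater than the number of engines at the hub
-- 				elif num_engines_to_move_from_current_hub > num_engines_at_current_hub:
-- 					return False # The action is not possible
-- 				else:
-- 					# Change the current state to edit to reflect the engines being moved from the hub
-- 					current_state_to_edit[engine_from] -= num_engines_to_move_from_current_hub
-- 	return True # The action is possible
-- ===== SOURCE B (Python) =====
-- def current_action_is_possible_with_current_state(current_action, current_state):
-- 	# A hub's moves are feasible iff the engines moved out of it (sum of the
-- 	# positive cells of its row) do not exceed its stock; no mutation needed.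
-- 	for i in range(7):
-- 		total = sum(n for n in current_action[i][:7] if n > 0)
-- 		if total > 0 and total > current_state[i]:
-- 			return False
-- 	return True
-- ===== Notes on version B (the rewrite author's own statement) =====
-- stated objective: simpler
-- what changed: Replaces the nested loop that mutates a copied state cell by cell with a per-hub check comparing the sum of the row's positive entries against that hub's stock; Pre_ is the exact closed-form condition under which A returns instead of raising IndexError (all seven rows readable and feasible, or an infeasible row preceded only by feasible ones).
import Mathlib
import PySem

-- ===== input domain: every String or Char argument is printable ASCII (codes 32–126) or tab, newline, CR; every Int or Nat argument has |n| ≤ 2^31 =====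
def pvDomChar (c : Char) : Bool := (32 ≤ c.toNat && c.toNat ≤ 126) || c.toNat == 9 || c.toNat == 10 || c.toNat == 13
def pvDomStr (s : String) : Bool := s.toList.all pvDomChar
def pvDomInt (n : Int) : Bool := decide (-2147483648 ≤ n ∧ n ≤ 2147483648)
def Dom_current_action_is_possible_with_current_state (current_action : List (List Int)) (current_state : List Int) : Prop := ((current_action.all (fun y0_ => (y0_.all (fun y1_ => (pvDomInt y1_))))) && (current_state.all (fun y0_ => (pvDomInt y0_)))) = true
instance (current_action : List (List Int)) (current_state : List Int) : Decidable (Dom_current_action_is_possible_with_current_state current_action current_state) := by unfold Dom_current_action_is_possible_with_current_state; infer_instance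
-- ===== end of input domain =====

-- B replaces A's nested-loop copy-and-subtract simulation by a per-row sum of the
-- positive cells compared against the hub's stock (objective: simpler, no mutation).


-- ===== PORT A =====
-- inner loop over engine_to; `none` = `return False`, `some st` = updated state copy.
-- Under Pre_ every read Python actually performs is in range, so `getD` equals Python's reads.
def pvA_inner (ca : List (List Int)) (i : Nat) : List Nat → List Int → Option (List Int)
  | [], st => some st
  | j :: js, st =>
    let num := (ca.getD i []).getD j 0
    if num > 0 then
      let atHub := st.getD i 0
      if atHub = 0 then none
      else if num > atHub then none
      else pvA_inner ca i js (st.set i (atHub - num))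
    else pvA_inner ca i js st

-- outer loop over engine_from, threading the edited state copy
def pvA_outer (ca : List (List Int)) : List Nat → List Int → Bool
  | [], _ => true
  | i :: is, st =>
    match pvA_inner ca i (List.range 7) st with
    | none => false
    | some st' => pvA_outer ca is st'

def current_action_is_possible_with_current_state (current_action : List (List Int)) (current_state : List Int) : Bool :=
  pvA_outer current_action (List.range 7) current_state

-- ===== PORT B =====
-- Source B: total = sum(n for n in current_action[i][:7] if n > 0); fail iff total > 0 and total > state[i]
def pvB_rowTotal (row : List Int) : Int := ((row.take 7).filter (fun n => n > 0)).sum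

def pvB_loop (ca : List (List Int)) (cs : List Int) : List Nat → Bool
  | [] => true
  | i :: is =>
    let total := pvB_rowTotal (ca.getD i [])
    if total > 0 ∧ total > cs.getD i 0 then false else pvB_loop ca cs is

def current_action_is_possible_with_current_state_alt (current_action : List (List Int)) (current_state : List Int) : Bool :=
  pvB_loop current_action current_state (List.range 7)

-- ===== PRECONDITION & SPEC =====
-- vocabulary for Pre_: total engines moved out of hub i, and per-row verdicts
def pvRowPos (ca : List (List Int)) (i : Nat) : Int := (((ca.getD i []).take 7).filter (fun n => n > 0)).sum
-- row i is fully readable and feasible (the scan passes it without raising or returning False)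
def pvRowPass (ca : List (List Int)) (cs : List Int) (i : Nat) : Prop :=
  i < ca.length ∧ 7 ≤ (ca.getD i []).length ∧
    (0 < pvRowPos ca i → i < cs.length ∧ pvRowPos ca i ≤ cs.getD i 0)
-- row i makes A return False (its positive outgoing total exceeds the hub's stock)
def pvRowFalse (ca : List (List Int)) (cs : List Int) (i : Nat) : Prop :=
  i < ca.length ∧ i < cs.length ∧ 0 < pvRowPos ca i ∧ cs.getD i 0 < pvRowPos ca i

-- Pre_ holds exactly when Python A returns (True: all seven rows pass; False: some row is
-- infeasible and every earlier row passes); on every other input A raises IndexError.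
def Pre_current_action_is_possible_with_current_state (current_action : List (List Int)) (current_state : List Int) : Prop :=
  (∀ i < 7, pvRowPass current_action current_state i) ∨
  (∃ i < 7, pvRowFalse current_action current_state i ∧ ∀ k < i, pvRowPass current_action current_state k)
instance (current_action : List (List Int)) (current_state : List Int) : Decidable (Pre_current_action_is_possible_with_current_state current_action current_state) := by
  unfold Pre_current_action_is_possible_with_current_state pvRowPass pvRowFalse; infer_instance

def pvWitness_current_action_is_possible_with_current_state : List (List Int) × List Int :=
  ([[1,0,0,0,0,0,0],[0,0,0,0,0,0,0],[0,0,0,0,0,0,0],[0,0,0,0,0,0,0],[0,0,0,0,0,0,0],[0,0,0,0,0,0,0],[0,0,0,0,0,0,0]], [2,0,0,0,0,0,0])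

def Spec_current_action_is_possible_with_current_state (current_action : List (List Int)) (current_state : List Int) (out : Bool) : Prop := out = current_action_is_possible_with_current_state_alt current_action current_state
instance (current_action : List (List Int)) (current_state : List Int) (out : Bool) : Decidable (Spec_current_action_is_possible_with_current_state current_action current_state out) := by unfold Spec_current_action_is_possible_with_current_state; infer_instance

-- ===== CLAIM (what is proved, stated in full; the proofs are below) =====
def Claim_equal_current_action_is_possible_with_current_state : Prop := ∀ (current_action : List (List Int)) (current_state : List Int), Dom_current_action_is_possible_with_current_state current_action current_state → Pre_current_action_is_possible_with_current_state current_action current_state → Spec_current_action_is_possible_with_current_state current_action current_state (current_action_is_possible_with_current_state current_action current_state)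

-- ===== LEMMAS AND PROOFS =====

-- positive-sum of the values A's inner loop reads over js
def pvPosSum (r : List Int) (js : List Nat) : Int := ((js.map (fun j => r.getD j 0)).filter (fun n => n > 0)).sum

theorem pvPosSum_cons (r : List Int) (j : Nat) (js : List Nat) :
    pvPosSum r (j :: js) = (if 0 < r.getD j 0 then r.getD j 0 else 0) + pvPosSum r js := by
  simp only [pvPosSum, List.map_cons, List.filter_cons]
  by_cases hp : (0:Int) < r.getD j 0
  · rw [if_pos hp, if_pos (by simpa using hp), List.sum_cons]
  · rw [if_neg hp, if_neg (by simpa using hp), zero_add]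

theorem pvPosSum_nonneg (r : List Int) (js : List Nat) : 0 ≤ pvPosSum r js := by
  induction js with
  | nil => simp [pvPosSum]
  | cons j js ih =>
    rw [pvPosSum_cons]
    split
    · next h => omega
    · omega

theorem pvSet_self (st : List Int) (i : Nat) (hi : i < st.length) : st.set i (st.getD i 0) = st := by
  apply List.ext_getElem?
  intro k
  by_cases hk : k = i
  · subst hk
    rw [List.getElem?_set_self hi, List.getD_eq_getElem?_getD, List.getElem?_eq_getElem hi,
      Option.getD_some]
  · rw [List.getElem?_set_ne (fun h => hk h.symm)]

-- characterisation of A's inner loop when index i is in range: it fails iff the positive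
-- total T of the cells it reads satisfies 0 < T ∧ st[i] < T, else it subtracts T at i.
theorem pvA_inner_spec (ca : List (List Int)) (i : Nat) (js : List Nat) :
    ∀ st : List Int, i < st.length →
    pvA_inner ca i js st =
      (if 0 < pvPosSum (ca.getD i []) js ∧ st.getD i 0 < pvPosSum (ca.getD i []) js
       then none
       else some (st.set i (st.getD i 0 - pvPosSum (ca.getD i []) js))) := by
  induction js with
  | nil =>
    intro st hi
    simp only [pvA_inner, pvPosSum, List.map_nil, List.filter_nil, List.sum_nil]
    rw [if_neg (by omega), sub_zero, pvSet_self st i hi]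
  | cons j js ih =>
    intro st hi
    have hT' := pvPosSum_nonneg (ca.getD i []) js
    have hsum := pvPosSum_cons (ca.getD i []) j js
    set num := (ca.getD i []).getD j 0 with hnum
    by_cases hpos : num > 0
    · -- positive cell: A checks and subtracts
      rw [show pvA_inner ca i (j :: js) st =
          (if num > 0 then
            if st.getD i 0 = 0 then none
            else if num > st.getD i 0 then none
            else pvA_inner ca i js (st.set i (st.getD i 0 - num))
          else pvA_inner ca i js st) from rfl]
      rw [if_pos hpos]
      set s := st.getD i 0 with hs
      by_cases hz : s = 0
      · rw [if_pos hz]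
        rw [if_pos]
        constructor
        · rw [hsum]; simp only [if_pos hpos]; omega
        · rw [hsum]; simp only [if_pos hpos]; omega
      · rw [if_neg hz]
        by_cases hgt : num > s
        · rw [if_pos hgt, if_pos]
          constructor
          · rw [hsum]; simp only [if_pos hpos]; omega
          · rw [hsum]; simp only [if_pos hpos]; omega
        · rw [if_neg hgt]
          have hlen' : i < (st.set i (s - num)).length := by simpa using hi
          rw [ih _ hlen']
          have hget : (st.set i (s - num)).getD i 0 = s - num := by
            rw [List.getD_eq_getElem?_getD, List.getElem?_set_self (by simpa using hi),
              Option.getD_some]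
          rw [hget]
          rw [hsum]; simp only [if_pos hpos]
          by_cases hc : 0 < pvPosSum (ca.getD i []) js ∧ s - num < pvPosSum (ca.getD i []) js
          · rw [if_pos hc, if_pos (by omega)]
          · rw [if_neg hc, if_neg (by omega)]
            rw [List.set_set]
            have hxy : s - num - pvPosSum (ca.getD i []) js = s - (num + pvPosSum (ca.getD i []) js) := by omega
            rw [hxy]
    · -- non-positive cell: skipped
      rw [show pvA_inner ca i (j :: js) st =
          (if num > 0 then
            if st.getD i 0 = 0 then none
            else if num > st.getD i 0 then none
            else pvA_inner ca i js (st.set i (st.getD i 0 - num))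
          else pvA_inner ca i js st) from rfl]
      rw [if_neg hpos, ih _ hi, hsum]
      have h0 : (if 0 < num then num else 0) = 0 := if_neg (by omega)
      rw [h0, zero_add]

-- inner loop with zero positive total touches nothing (works for any state length)
theorem pvA_inner_zero (ca : List (List Int)) (i : Nat) :
    ∀ (js : List Nat) (st : List Int), pvPosSum (ca.getD i []) js = 0 →
    pvA_inner ca i js st = some st := by
  intro js
  induction js with
  | nil => intro st _; rfl
  | cons j js ih =>
    intro st h
    have hT' := pvPosSum_nonneg (ca.getD i []) js
    rw [pvPosSum_cons] at h
    have hnp : ¬ ((ca.getD i []).getD j 0 > 0) := by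
      intro hp
      rw [if_pos hp] at h
      omega
    rw [show pvA_inner ca i (j :: js) st =
        (if (ca.getD i []).getD j 0 > 0 then
          if st.getD i 0 = 0 then none
          else if (ca.getD i []).getD j 0 > st.getD i 0 then none
          else pvA_inner ca i js (st.set i (st.getD i 0 - (ca.getD i []).getD j 0))
        else pvA_inner ca i js st) from rfl]
    rw [if_neg hnp]
    rw [if_neg hnp, zero_add] at h
    exact ih st h

-- the positive sum A reads over range n equals B's positive sum over the row's first n cells
theorem pvPosSum_range (r : List Int) : ∀ n : Nat,
    pvPosSum r (List.range n) = ((r.take n).filter (fun m => m > 0)).sum := by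
  intro n
  induction n with
  | zero => simp [pvPosSum]
  | succ n ih =>
    rw [show pvPosSum r (List.range (n + 1)) = pvPosSum r (List.range n) + pvPosSum r [n] from by
      simp only [pvPosSum, List.range_succ, List.map_append, List.filter_append, List.sum_append]]
    rw [ih]
    by_cases hn : n < r.length
    · have hg : r.getD n 0 = r[n] := by
        rw [List.getD_eq_getElem?_getD, List.getElem?_eq_getElem hn, Option.getD_some]
      have h2 : pvPosSum r [n] = ([r[n]].filter (fun n => n > 0)).sum := by
        simp only [pvPosSum, List.map_cons, List.map_nil, hg]
      rw [h2, List.take_add_one, List.getElem?_eq_getElem hn, Option.toList_some,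
        List.filter_append, List.sum_append]
    · have h1 : r.getD n 0 = 0 := by
        rw [List.getD_eq_getElem?_getD, List.getElem?_eq_none (by omega)]
        rfl
      have h2 : pvPosSum r [n] = 0 := by
        simp only [pvPosSum, List.map_cons, List.map_nil, h1, List.filter_cons]
        rw [if_neg (by decide)]
        rfl
      have h3 : r.take (n + 1) = r.take n := by
        rw [List.take_of_length_le (by omega), List.take_of_length_le (by omega)]
      rw [h2, h3, add_zero]

theorem pvRowPos_eq (ca : List (List Int)) (i : Nat) :
    pvPosSum (ca.getD i []) (List.range 7) = pvRowPos ca i := pvPosSum_range _ 7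

theorem pvRowPos_nonneg (ca : List (List Int)) (i : Nat) : 0 ≤ pvRowPos ca i := by
  rw [← pvRowPos_eq]; exact pvPosSum_nonneg _ _

-- main induction over the (strictly increasing) list of row indices
theorem pvOuter_eq (ca : List (List Int)) (cs : List Int) :
    ∀ (is : List Nat) (st : List Int), st.length = cs.length →
    is.Pairwise (· < ·) →
    (∀ k ∈ is, st.getD k 0 = cs.getD k 0) →
    ((∀ k ∈ is, pvRowPass ca cs k) ∨
      ∃ i0 ∈ is, pvRowFalse ca cs i0 ∧ ∀ k ∈ is, k < i0 → pvRowPass ca cs k) →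
    pvA_outer ca is st = pvB_loop ca cs is := by
  intro is
  induction is with
  | nil => intro st _ _ _ _; rfl
  | cons i is ih =>
    intro st hlen hpw hst hpre
    have hpw' : is.Pairwise (· < ·) := (List.pairwise_cons.mp hpw).2
    have hlt : ∀ k ∈ is, i < k := (List.pairwise_cons.mp hpw).1
    have hTnn := pvRowPos_nonneg ca i
    have hsti : st.getD i 0 = cs.getD i 0 := hst i (List.mem_cons_self ..)
    rw [show pvA_outer ca (i :: is) st =
        (match pvA_inner ca i (List.range 7) st with
         | none => false
         | some st' => pvA_outer ca is st') from rfl]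
    rw [show pvB_loop ca cs (i :: is) =
        (if pvB_rowTotal (ca.getD i []) > 0 ∧ pvB_rowTotal (ca.getD i []) > cs.getD i 0
         then false else pvB_loop ca cs is) from rfl]
    have hBT : pvB_rowTotal (ca.getD i []) = pvRowPos ca i := rfl
    rw [hBT]
    by_cases hcond : 0 < pvRowPos ca i ∧ cs.getD i 0 < pvRowPos ca i
    · -- the failing row: both return False
      have hics : i < cs.length := by
        rcases hpre with hall | ⟨i0, hi0, hf, hearly⟩
        · rcases (hall i (List.mem_cons_self ..)).2.2 hcond.1 with ⟨h1, h2⟩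
          omega
        · rcases List.mem_cons.mp hi0 with h | h
          · exact h ▸ hf.2.1
          · rcases (hearly i (List.mem_cons_self ..) (hlt i0 h)).2.2 hcond.1 with ⟨h1, h2⟩
            omega
      rw [pvA_inner_spec ca i (List.range 7) st (by omega), pvRowPos_eq, hsti,
        if_pos hcond, if_pos ⟨hcond.1, hcond.2⟩]
    · -- the row passes: both continue
      rw [if_neg (fun h => hcond ⟨h.1, h.2⟩)]
      have hpre' : (∀ k ∈ is, pvRowPass ca cs k) ∨
          ∃ i0 ∈ is, pvRowFalse ca cs i0 ∧ ∀ k ∈ is, k < i0 → pvRowPass ca cs k := by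
        rcases hpre with hall | ⟨i0, hi0, hf, hearly⟩
        · exact Or.inl fun k hk => hall k (List.mem_cons_of_mem _ hk)
        · rcases List.mem_cons.mp hi0 with h | h
          · exact absurd ⟨(h ▸ hf).2.2.1, (h ▸ hf).2.2.2⟩ hcond
          · exact Or.inr ⟨i0, h, hf, fun k hk hki => hearly k (List.mem_cons_of_mem _ hk) hki⟩
      rcases eq_or_lt_of_le hTnn with hT0 | hTpos
      · -- no engines leave hub i: the state is untouched
        rw [pvA_inner_zero ca i (List.range 7) st (by rw [pvRowPos_eq]; omega)]
        exact ih st hlen hpw' (fun k hk => hst k (List.mem_cons_of_mem _ hk)) hpre'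
      · -- engines leave but the stock suffices: subtract and continue
        have hle : pvRowPos ca i ≤ cs.getD i 0 := by omega
        have hics : i < cs.length := by
          rcases hpre with hall | ⟨i0, hi0, hf, hearly⟩
          · exact ((hall i (List.mem_cons_self ..)).2.2 hTpos).1
          · rcases List.mem_cons.mp hi0 with h | h
            · exact absurd (h ▸ hf).2.2.2 (by omega)
            · exact ((hearly i (List.mem_cons_self ..) (hlt i0 h)).2.2 hTpos).1
        rw [pvA_inner_spec ca i (List.range 7) st (by omega), pvRowPos_eq, hsti,
          if_neg (fun h => hcond ⟨h.1, h.2⟩)]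
        apply ih _ (by simpa using hlen) hpw' _ hpre'
        intro k hk
        have hki : i ≠ k := by have := hlt k hk; omega
        rw [List.getD_eq_getElem?_getD, List.getElem?_set_ne hki,
          ← List.getD_eq_getElem?_getD]
        exact hst k (List.mem_cons_of_mem _ hk)

-- ===== VERDICT (by name: the statement is the Claim_ definition above) =====
theorem current_action_is_possible_with_current_state_spec : Claim_equal_current_action_is_possible_with_current_state := by
  intro ca cs _ hpre
  unfold Spec_current_action_is_possible_with_current_state
  unfold current_action_is_possible_with_current_state current_action_is_possible_with_current_state_alt
  apply pvOuter_eq ca cs (List.range 7) cs rfl (List.pairwise_lt_range) (fun _ _ => rfl)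
  rcases hpre with hall | ⟨i, hi7, hf, hearly⟩
  · exact Or.inl fun k hk => hall k (List.mem_range.mp hk)
  · exact Or.inr ⟨i, List.mem_range.mpr hi7, hf, fun k _ hki => hearly k hki⟩
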